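-- pv_equiv track=rewrite | github.com/tammet/reactsdb | utils/sql2json.py | get_namefield
-- ===== SOURCE A (Python) =====
-- def get_namefield(fields,tablename):
--   bestsname=None # best shortened version of name
--   bestname=None # best original version of name
--   for field in fields:
--     if not ("name" in field): continue
--     name=field["name"]
--     sname=name.lower()
--     sname=sname.replace(tablename.lower(),"")
--     # sname is shortened lowercase name
--     if ("name" in sname):
--       if (not bestsname) or len(bestsname)>len(sname):
--         bestsname=sname
--         bestname=name
--     if ("title" in sname):
--       if (not bestsname) or len(bestsname)>len(sname):
--         bestsname=sname
--         bestname=name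
--   return bestname
-- ===== SOURCE B (Python) =====
-- def get_namefield(fields, tablename):
--     tl = tablename.lower()
--     cands = []
--     for field in fields:
--         if "name" not in field:
--             continue
--         name = field["name"]
--         sname = name.lower().replace(tl, "")
--         if "name" in sname or "title" in sname:
--             cands.append((len(sname), name))
--     if not cands:
--         return None
--     cands.sort(key=lambda p: p[0])  # stable: first-encountered wins on ties
--     return cands[0][1]
-- ===== Notes on version B (the rewrite author's own statement) =====
-- stated objective: alternative
-- what changed: Replaces the incremental two-branch best-so-far tracking (with Python-truthiness test on the best string) by a build-candidates / stable-sort-by-length / take-first selection.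
import Mathlib
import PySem

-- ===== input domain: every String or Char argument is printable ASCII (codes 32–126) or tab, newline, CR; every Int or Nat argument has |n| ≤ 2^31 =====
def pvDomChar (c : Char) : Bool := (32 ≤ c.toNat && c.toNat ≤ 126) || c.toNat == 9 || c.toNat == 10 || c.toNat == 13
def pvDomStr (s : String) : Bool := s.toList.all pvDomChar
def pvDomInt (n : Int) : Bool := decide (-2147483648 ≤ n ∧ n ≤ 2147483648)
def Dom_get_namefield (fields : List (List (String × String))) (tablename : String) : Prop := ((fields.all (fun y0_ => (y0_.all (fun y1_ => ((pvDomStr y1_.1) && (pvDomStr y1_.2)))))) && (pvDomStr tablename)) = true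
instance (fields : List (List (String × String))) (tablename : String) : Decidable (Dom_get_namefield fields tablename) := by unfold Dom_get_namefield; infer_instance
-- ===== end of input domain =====

-- B replaces A's incremental two-branch best-so-far tracking by collect-candidates / stable-sort / take-first (alternative decomposition, same results).

-- ===== PORT A =====
-- A-side helper: the body of A's 'for field in fields' loop, acting on (bestsname, bestname).
def get_namefield_step (tablename : String) (best : Option String × Option String) (field : List (String × String)) : Option String × Option String :=
  match (PySem.Dict.mk field).get? "name" with
  | none => best            -- if not ("name" in field): continue
  | some name =>
    let sname := PySem.Str.replace (PySem.Str.lower name) (PySem.Str.lower tablename) ""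
    let best1 :=
      if PySem.Str.isIn "name" sname then
        -- '(not bestsname) or len(bestsname)>len(sname)': Python truthiness (None and "" are falsy)
        if (match best.1 with
            | none => true
            | some b => b == "" || decide (PySem.Str.len sname < PySem.Str.len b)) then
          (some sname, some name)
        else best
      else best
    if PySem.Str.isIn "title" sname then
      if (match best1.1 with
          | none => true
          | some b => b == "" || decide (PySem.Str.len sname < PySem.Str.len b)) then
        (some sname, some name)
      else best1
    else best1

def get_namefield (fields : List (List (String × String))) (tablename : String) : Option String :=
  (fields.foldl (get_namefield_step tablename) (none, none)).2

-- ===== PORT B =====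
-- B-side helper: the body of B's candidate-collecting loop.
def get_namefield_alt_step (tl : String) (acc : List (Int × String)) (field : List (String × String)) : List (Int × String) :=
  match (PySem.Dict.mk field).get? "name" with
  | none => acc
  | some name =>
    let sname := PySem.Str.replace (PySem.Str.lower name) tl ""
    if PySem.Str.isIn "name" sname || PySem.Str.isIn "title" sname then
      acc ++ [(PySem.Str.len sname, name)]
    else acc

def get_namefield_alt (fields : List (List (String × String))) (tablename : String) : Option String :=
  let tl := PySem.Str.lower tablename
  let cands := fields.foldl (get_namefield_alt_step tl) []
  match PySem.List.sorted cands (fun p => p.1) false with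
  | [] => none
  | p :: _ => some p.2

-- ===== PRECONDITION & SPEC =====
def Spec_get_namefield (fields : List (List (String × String))) (tablename : String) (out : Option String) : Prop := out = get_namefield_alt fields tablename
instance (fields : List (List (String × String))) (tablename : String) (out : Option String) : Decidable (Spec_get_namefield fields tablename out) := by unfold Spec_get_namefield; infer_instance

-- ===== CLAIM (what is proved, stated in full; the proofs are below) =====
def Claim_equal_get_namefield : Prop := ∀ (fields : List (List (String × String))) (tablename : String), Dom_get_namefield fields tablename → Spec_get_namefield fields tablename (get_namefield fields tablename)

-- ===== LEMMAS AND PROOFS =====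

-- the candidate a field contributes (shortened lowercase name, original name), if any
def pvCand (tablename : String) (field : List (String × String)) : Option (String × String) :=
  match (PySem.Dict.mk field).get? "name" with
  | none => none
  | some name =>
    let sname := PySem.Str.replace (PySem.Str.lower name) (PySem.Str.lower tablename) ""
    if PySem.Str.isIn "name" sname || PySem.Str.isIn "title" sname then some (sname, name) else none

-- first-wins strict minimum by length of the shortened name
def pvPick (m : Option (String × String)) (c : String × String) : Option (String × String) :=
  match m with
  | none => some c
  | some b => if PySem.Str.len c.1 < PySem.Str.len b.1 then some c else some b

def pvMStep (tablename : String) (m : Option (String × String)) (field : List (String × String)) : Option (String × String) :=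
  match pvCand tablename field with
  | none => m
  | some c => pvPick m c

def pvProj (m : Option (String × String)) : Option String × Option String := (m.map Prod.fst, m.map Prod.snd)

def pvInv (m : Option (String × String)) : Prop := ∀ p, m = some p → p.1 ≠ ""

def pvProjI (p : String × String) : Int × String := (PySem.Str.len p.1, p.2)

def pvPickI (m : Option (Int × String)) (c : Int × String) : Option (Int × String) :=
  match m with
  | none => some c
  | some b => if c.1 < b.1 then some c else some b

def pvIStep (tablename : String) (m : Option (Int × String)) (field : List (String × String)) : Option (Int × String) :=
  match pvCand tablename field with
  | none => m
  | some c => pvPickI m (pvProjI c)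

lemma pvCand_ne_empty (tn : String) (field : List (String × String)) (s n : String)
    (h : pvCand tn field = some (s, n)) : s ≠ "" := by
  unfold pvCand at h
  rcases hg : (PySem.Dict.mk field).get? "name" with _ | name <;> rw [hg] at h
  · exact absurd h (by simp)
  · dsimp only at h
    split_ifs at h with hcond
    injection h with h2
    injection h2 with hs hn
    intro he
    rw [hs, he] at hcond
    revert hcond; decide

lemma pvInv_mstep (tn : String) (m : Option (String × String)) (field : List (String × String))
    (h : pvInv m) : pvInv (pvMStep tn m field) := by
  unfold pvMStep
  rcases hc : pvCand tn field with _ | ⟨s, n⟩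
  · exact h
  · intro p hp
    rcases m with _ | b
    · simp only [pvPick] at hp
      injection hp with hpe
      rw [← hpe]
      exact pvCand_ne_empty tn field s n hc
    · simp only [pvPick] at hp
      split_ifs at hp
      · injection hp with hpe
        rw [← hpe]
        exact pvCand_ne_empty tn field s n hc
      · injection hp with hpe
        rw [← hpe]
        exact h b rfl

-- A's loop body computes pvMStep (through pvProj), given the invariant
lemma step_eq (tn : String) (m : Option (String × String)) (field : List (String × String))
    (h : pvInv m) : get_namefield_step tn (pvProj m) field = pvProj (pvMStep tn m field) := by
  unfold get_namefield_step pvMStep pvCand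
  rcases hg : (PySem.Dict.mk field).get? "name" with _ | name
  · rfl
  · dsimp only
    generalize PySem.Str.replace (PySem.Str.lower name) (PySem.Str.lower tn) "" = sname
    rcases m with _ | ⟨b, bn⟩
    · by_cases h1 : PySem.Chars.isIn ['n', 'a', 'm', 'e'] sname.toList = true <;>
        by_cases h2 : PySem.Chars.isIn ['t', 'i', 't', 'l', 'e'] sname.toList = true
      · have hne : sname ≠ "" := by
          intro he; rw [he] at h1; revert h1; decide
        simp [pvProj, pvPick, h1, h2, hne]
      · simp [pvProj, pvPick, h1, h2]
      · simp [pvProj, pvPick, h1, h2]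
      · simp [pvProj, h1, h2]
    · have hb : b ≠ "" := h (b, bn) rfl
      by_cases h1 : PySem.Chars.isIn ['n', 'a', 'm', 'e'] sname.toList = true <;>
        by_cases h2 : PySem.Chars.isIn ['t', 'i', 't', 'l', 'e'] sname.toList = true
      · have hne : sname ≠ "" := by
          intro he; rw [he] at h1; revert h1; decide
        by_cases hlt : sname.length < b.length
        · simp [pvProj, pvPick, h1, h2, hne, hlt]
        · simp [pvProj, pvPick, h1, h2, hb, hlt]
      · by_cases hlt : sname.length < b.length
        · simp [pvProj, pvPick, h1, h2, hlt]
        · simp [pvProj, pvPick, h1, h2, hb, hlt]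
      · by_cases hlt : sname.length < b.length
        · simp [pvProj, pvPick, h1, h2, hlt]
        · simp [pvProj, pvPick, h1, h2, hb, hlt]
      · simp [pvProj, h1, h2]

-- A's fold is the pvMStep fold, through pvProj
lemma A_fold (tn : String) (fields : List (List (String × String))) :
    ∀ m, pvInv m →
      fields.foldl (get_namefield_step tn) (pvProj m) = pvProj (fields.foldl (pvMStep tn) m) := by
  induction fields with
  | nil => intro m _; rfl
  | cons f t ih =>
    intro m hm
    simp only [List.foldl_cons, step_eq tn m f hm]
    exact ih _ (pvInv_mstep tn m f hm)

-- B's candidate step appends the (length, name) image of pvCand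
lemma alt_step_eq (tn : String) (acc : List (Int × String)) (field : List (String × String)) :
    get_namefield_alt_step (PySem.Str.lower tn) acc field =
      match pvCand tn field with
      | none => acc
      | some c => acc ++ [pvProjI c] := by
  unfold get_namefield_alt_step pvCand
  rcases hg : (PySem.Dict.mk field).get? "name" with _ | name
  · rfl
  · dsimp only
    split_ifs with hc
    · simp [pvProjI]
    · rfl

-- head of PySem's stable sort = first strict minimum (min?)
lemma head_foldl_insertBy {α κ : Type} [LinearOrder κ] (key : α → κ) (xs : List α) :
    ∀ acc : List α,
      (xs.foldl (fun acc x => PySem.List.insertBy (fun a b => decide (key a < key b)) x acc) acc).head? =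
        xs.foldl (fun m x => match m with
          | none => some x
          | some m' => if key x < key m' then some x else some m') acc.head? := by
  induction xs with
  | nil => intro acc; rfl
  | cons x t ih =>
    intro acc
    rw [List.foldl_cons, List.foldl_cons, ih]
    congr 1
    rcases acc with _ | ⟨y, ys⟩
    · rfl
    · simp only [PySem.List.insertBy, List.head?]
      by_cases h : key x < key y
      · simp [h]
      · simp [h]

lemma head_sorted_eq_min? {α κ : Type} [LinearOrder κ] (xs : List α) (key : α → κ) :
    (PySem.List.sorted xs key false).head? = PySem.List.min? xs key := by
  rw [PySem.List.sorted_eq_foldl_insertBy]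
  have h := head_foldl_insertBy key xs []
  simpa [PySem.List.min?] using h

lemma min?_append_singleton (acc : List (Int × String)) (x : Int × String) :
    PySem.List.min? (acc ++ [x]) (fun p => p.1) =
      pvPickI (PySem.List.min? acc (fun p => p.1)) x := by
  simp only [PySem.List.min?, pvPickI, List.foldl_append, List.foldl_cons, List.foldl_nil]
  split <;> rename_i heq <;> rw [heq]

-- min? over the left-to-right-built candidate list is the pvIStep fold
lemma min?_build (tn : String) (fields : List (List (String × String))) :
    ∀ acc : List (Int × String),
      PySem.List.min? (fields.foldl (get_namefield_alt_step (PySem.Str.lower tn)) acc) (fun p => p.1) =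
        fields.foldl (pvIStep tn) (PySem.List.min? acc (fun p => p.1)) := by
  induction fields with
  | nil => intro acc; rfl
  | cons f t ih =>
    intro acc
    rw [List.foldl_cons, List.foldl_cons, ih, alt_step_eq]
    congr 1
    unfold pvIStep
    rcases pvCand tn f with _ | c
    · rfl
    · exact min?_append_singleton acc (pvProjI c)

-- the pvMStep fold, mapped through pvProjI, is the pvIStep fold
lemma map_fold (tn : String) (fields : List (List (String × String))) :
    ∀ m : Option (String × String),
      (fields.foldl (pvMStep tn) m).map pvProjI = fields.foldl (pvIStep tn) (m.map pvProjI) := by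
  induction fields with
  | nil => intro m; rfl
  | cons f t ih =>
    intro m
    rw [List.foldl_cons, List.foldl_cons, ih]
    congr 1
    unfold pvMStep pvIStep
    rcases pvCand tn f with _ | c
    · rfl
    · rcases m with _ | b
      · rfl
      · simp only [pvPick, pvPickI, pvProjI, Option.map_some]
        split_ifs <;> rfl

-- ===== VERDICT (by name: the statement is the Claim_ definition above) =====
theorem get_namefield_spec : Claim_equal_get_namefield := by
  intro fields tn _
  unfold Spec_get_namefield get_namefield get_namefield_alt
  show (List.foldl (get_namefield_step tn) (pvProj none) fields).2 =
    match PySem.List.sorted (List.foldl (get_namefield_alt_step (PySem.Str.lower tn)) [] fields)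
      (fun p : Int × String => p.1) false with
    | [] => none
    | p :: _ => some p.2
  rw [A_fold tn fields none (fun p hp => by cases hp)]
  have hmin : PySem.List.min? (List.foldl (get_namefield_alt_step (PySem.Str.lower tn)) [] fields)
      (fun p : Int × String => p.1) = (List.foldl (pvMStep tn) none fields).map pvProjI := by
    rw [min?_build tn fields [], map_fold tn fields none]
    rfl
  rcases hs : PySem.List.sorted (List.foldl (get_namefield_alt_step (PySem.Str.lower tn)) [] fields)
      (fun p : Int × String => p.1) false with _ | ⟨p, rest⟩
  · have hh : (List.foldl (pvMStep tn) none fields).map pvProjI = none := by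
      rw [← hmin, ← head_sorted_eq_min?, hs]
      rfl
    rcases hq : List.foldl (pvMStep tn) none fields with _ | q
    · rfl
    · rw [hq] at hh; simp at hh
  · have hh : (List.foldl (pvMStep tn) none fields).map pvProjI = some p := by
      rw [← hmin, ← head_sorted_eq_min?, hs]
      rfl
    rcases hq : List.foldl (pvMStep tn) none fields with _ | q
    · rw [hq] at hh; simp at hh
    · rw [hq] at hh
      injection hh with hh2
      show some q.2 = some p.2
      rw [← hh2]
      rfl
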